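-- pv_equiv track=rewrite | github.com/ashm0336-blip/Bassam | backend/routes/sessions.py | _recalc_summary
-- ===== SOURCE A (Python) =====
-- def _recalc_summary(zones):
--     summary = {"added": 0, "removed": 0, "modified": 0, "unchanged": 0}
--     for z in zones:
--         ct = z.get("change_type", "unchanged")
--         if ct == "added": summary["added"] += 1
--         elif ct in ("removed",): summary["removed"] += 1
--         elif ct in ("modified", "category_changed", "moved"): summary["modified"] += 1
--         else: summary["unchanged"] += 1
--     return summary
-- ===== SOURCE B (Python) =====
-- def _recalc_summary(zones):
--     # One pass: tally raw change_type values; then map categories and derive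
--     # "unchanged" by subtraction so unknown change_types fall through to it.
--     cnt = {}
--     for z in zones:
--         ct = z.get("change_type", "unchanged")
--         cnt[ct] = cnt.get(ct, 0) + 1
--     added = cnt.get("added", 0)
--     removed = cnt.get("removed", 0)
--     modified = cnt.get("modified", 0) + cnt.get("category_changed", 0) + cnt.get("moved", 0)
--     return {"added": added, "removed": removed, "modified": modified,
--             "unchanged": len(zones) - added - removed - modified}
-- ===== Notes on version B (the rewrite author's own statement) =====
-- stated objective: simpler
-- what changed: B replaces A's four-way branch updating a summary dict inside the loop by a one-pass tally of raw change_type values into a counter dict, then derives the four summary fields afterwards, with 'unchanged' obtained by subtraction so unknown change_types fall through exactly like A's else branch.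
import Mathlib
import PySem

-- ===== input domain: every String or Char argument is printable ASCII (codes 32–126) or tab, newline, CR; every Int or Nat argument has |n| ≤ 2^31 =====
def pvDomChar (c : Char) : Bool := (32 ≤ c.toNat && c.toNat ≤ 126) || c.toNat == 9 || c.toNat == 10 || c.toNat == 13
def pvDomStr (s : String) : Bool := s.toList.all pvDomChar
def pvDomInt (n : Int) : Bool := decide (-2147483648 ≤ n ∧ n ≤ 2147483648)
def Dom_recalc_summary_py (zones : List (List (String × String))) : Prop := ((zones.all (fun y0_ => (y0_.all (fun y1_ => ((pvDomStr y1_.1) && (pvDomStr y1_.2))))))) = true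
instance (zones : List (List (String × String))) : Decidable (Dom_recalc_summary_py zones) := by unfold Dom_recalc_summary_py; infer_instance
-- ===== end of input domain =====

-- B tallies raw change_type values in one pass into a counter, then derives the
-- four summary fields (with "unchanged" by subtraction) — simpler decomposition, same cost.

-- ===== PORT A =====
def recalc_summary_py (zones : List (List (String × String))) : List (String × Int) :=
  let summary : PySem.Dict String Int :=
    PySem.Dict.mk [("added", 0), ("removed", 0), ("modified", 0), ("unchanged", 0)]
  let final := zones.foldl (fun s z =>
    let ct := (PySem.Dict.mk z).getD "change_type" "unchanged"
    if ct == "added" then s.insert "added" (s.getD "added" 0 + 1)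
    else if ct == "removed" then s.insert "removed" (s.getD "removed" 0 + 1)
    else if ct == "modified" || ct == "category_changed" || ct == "moved" then
      s.insert "modified" (s.getD "modified" 0 + 1)
    else s.insert "unchanged" (s.getD "unchanged" 0 + 1)) summary
  final.items

-- ===== PORT B =====
def recalc_summary_py_alt (zones : List (List (String × String))) : List (String × Int) :=
  let cnt : PySem.Dict String Int :=
    zones.foldl (fun c z =>
      let ct := (PySem.Dict.mk z).getD "change_type" "unchanged"
      c.insert ct (c.getD ct 0 + 1)) PySem.Dict.empty
  let added := cnt.getD "added" 0
  let removed := cnt.getD "removed" 0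
  let modified := cnt.getD "modified" 0 + cnt.getD "category_changed" 0 + cnt.getD "moved" 0
  [("added", added), ("removed", removed), ("modified", modified),
   ("unchanged", (zones.length : Int) - added - removed - modified)]

-- ===== PRECONDITION & SPEC =====
def Spec_recalc_summary_py (zones : List (List (String × String))) (out : List (String × Int)) : Prop := out = recalc_summary_py_alt zones
instance (zones : List (List (String × String))) (out : List (String × Int)) : Decidable (Spec_recalc_summary_py zones out) := by unfold Spec_recalc_summary_py; infer_instance

-- ===== CLAIM (what is proved, stated in full; the proofs are below) =====
def Claim_equal_recalc_summary_py : Prop := ∀ (zones : List (List (String × String))), Dom_recalc_summary_py zones → Spec_recalc_summary_py zones (recalc_summary_py zones)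

-- ===== LEMMAS AND PROOFS =====

def pvCt (z : List (String × String)) : String := (PySem.Dict.mk z).getD "change_type" "unchanged"

def pvMk4 (a r m u : Int) : PySem.Dict String Int :=
  PySem.Dict.mk [("added", a), ("removed", r), ("modified", m), ("unchanged", u)]

def pvStep (s : PySem.Dict String Int) (z : List (String × String)) : PySem.Dict String Int :=
  let ct := (PySem.Dict.mk z).getD "change_type" "unchanged"
  if ct == "added" then s.insert "added" (s.getD "added" 0 + 1)
  else if ct == "removed" then s.insert "removed" (s.getD "removed" 0 + 1)
  else if ct == "modified" || ct == "category_changed" || ct == "moved" then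
    s.insert "modified" (s.getD "modified" 0 + 1)
  else s.insert "unchanged" (s.getD "unchanged" 0 + 1)

def pvElse (c : String) : Bool :=
  !(c == "added" || c == "removed" || c == "modified" || c == "category_changed" || c == "moved")

theorem pv_stepA (a r m u : Int) :
    (pvMk4 a r m u).insert "added" ((pvMk4 a r m u).getD "added" 0 + 1) = pvMk4 (a + 1) r m u := by
  simp [pvMk4, PySem.Dict.insert, PySem.Dict.getD, PySem.Dict.get?]

theorem pv_stepR (a r m u : Int) :
    (pvMk4 a r m u).insert "removed" ((pvMk4 a r m u).getD "removed" 0 + 1) = pvMk4 a (r + 1) m u := by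
  simp [pvMk4, PySem.Dict.insert, PySem.Dict.getD, PySem.Dict.get?]

theorem pv_stepM (a r m u : Int) :
    (pvMk4 a r m u).insert "modified" ((pvMk4 a r m u).getD "modified" 0 + 1) = pvMk4 a r (m + 1) u := by
  simp [pvMk4, PySem.Dict.insert, PySem.Dict.getD, PySem.Dict.get?]

theorem pv_stepU (a r m u : Int) :
    (pvMk4 a r m u).insert "unchanged" ((pvMk4 a r m u).getD "unchanged" 0 + 1) = pvMk4 a r m (u + 1) := by
  simp [pvMk4, PySem.Dict.insert, PySem.Dict.getD, PySem.Dict.get?]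

theorem pvA_eq (zones : List (List (String × String))) :
    recalc_summary_py zones = (zones.foldl pvStep (pvMk4 0 0 0 0)).items := rfl

theorem pv_inv (zs : List (List (String × String))) :
    ∀ (a r m u : Int),
      zs.foldl pvStep (pvMk4 a r m u) =
      pvMk4 (a + ((zs.map pvCt).count "added" : Int))
            (r + ((zs.map pvCt).count "removed" : Int))
            (m + ((zs.map pvCt).count "modified" : Int)
               + ((zs.map pvCt).count "category_changed" : Int)
               + ((zs.map pvCt).count "moved" : Int))
            (u + (((zs.map pvCt).countP pvElse : Nat) : Int)) := by
  induction zs with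
  | nil => intro a r m u; simp
  | cons z zs ih =>
    intro a r m u
    have hct : pvStep (pvMk4 a r m u) z =
        (if pvCt z == "added" then pvMk4 (a + 1) r m u
        else if pvCt z == "removed" then pvMk4 a (r + 1) m u
        else if pvCt z == "modified" || pvCt z == "category_changed" || pvCt z == "moved" then
          pvMk4 a r (m + 1) u
        else pvMk4 a r m (u + 1)) := by
      show (if pvCt z == "added" then
              (pvMk4 a r m u).insert "added" ((pvMk4 a r m u).getD "added" 0 + 1)
            else if pvCt z == "removed" then
              (pvMk4 a r m u).insert "removed" ((pvMk4 a r m u).getD "removed" 0 + 1)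
            else if pvCt z == "modified" || pvCt z == "category_changed" || pvCt z == "moved" then
              (pvMk4 a r m u).insert "modified" ((pvMk4 a r m u).getD "modified" 0 + 1)
            else (pvMk4 a r m u).insert "unchanged" ((pvMk4 a r m u).getD "unchanged" 0 + 1)) = _
      split_ifs <;> simp [pv_stepA, pv_stepR, pv_stepM, pv_stepU]
    rw [List.foldl_cons, hct]
    split_ifs with hA hR hM
    · have h : pvCt z = "added" := by simpa using hA
      rw [ih]
      simp [pvMk4, pvElse, h]
      omega
    · have h : pvCt z = "removed" := by simpa using hR
      rw [ih]
      simp [pvMk4, pvElse, h]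
      omega
    · have h : (pvCt z = "modified" ∨ pvCt z = "category_changed") ∨ pvCt z = "moved" := by
        simpa using hM
      rw [ih]
      rcases h with (h | h) | h <;>
        · simp [pvMk4, pvElse, h]
          omega
    · have h1 : pvCt z ≠ "added" := by simpa using hA
      have h2 : pvCt z ≠ "removed" := by simpa using hR
      have h345 : ¬pvCt z = "modified" ∧ ¬pvCt z = "category_changed" ∧ ¬pvCt z = "moved" := by
        simpa [or_assoc, not_or] using hM
      obtain ⟨h3, h4, h5⟩ := h345
      rw [ih]
      simp [pvMk4, pvElse, h1, h2, h3, h4, h5]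
      omega

theorem pv_partition (l : List String) :
    l.count "added" + l.count "removed" + l.count "modified" + l.count "category_changed"
      + l.count "moved" + l.countP pvElse = l.length := by
  induction l with
  | nil => simp
  | cons c l ih =>
    simp only [List.count_cons, List.countP_cons, List.length_cons]
    by_cases h1 : c = "added" <;> by_cases h2 : c = "removed" <;>
      by_cases h3 : c = "modified" <;> by_cases h4 : c = "category_changed" <;>
      by_cases h5 : c = "moved" <;> simp_all [pvElse] <;> omega

theorem pv_foldl_map (zs : List (List (String × String))) :
    ∀ (c : PySem.Dict String Int),
      zs.foldl (fun c z => c.insert (pvCt z) (c.getD (pvCt z) 0 + 1)) c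
        = (zs.map pvCt).foldl (fun c x => c.insert x (c.getD x 0 + 1)) c := by
  induction zs with
  | nil => intro c; rfl
  | cons z zs ih => intro c; simp only [List.foldl_cons, List.map_cons, ih]

theorem pvB_eq (zones : List (List (String × String))) :
    recalc_summary_py_alt zones =
      [("added", ((zones.map pvCt).count "added" : Int)),
       ("removed", ((zones.map pvCt).count "removed" : Int)),
       ("modified", ((zones.map pvCt).count "modified" : Int)
          + ((zones.map pvCt).count "category_changed" : Int)
          + ((zones.map pvCt).count "moved" : Int)),
       ("unchanged", (zones.length : Int) - ((zones.map pvCt).count "added" : Int)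
          - ((zones.map pvCt).count "removed" : Int)
          - (((zones.map pvCt).count "modified" : Int)
             + ((zones.map pvCt).count "category_changed" : Int)
             + ((zones.map pvCt).count "moved" : Int)))] := by
  have h0 : recalc_summary_py_alt zones =
      (let cnt := zones.foldl (fun c z => c.insert (pvCt z) (c.getD (pvCt z) 0 + 1))
        PySem.Dict.empty
      [("added", cnt.getD "added" 0), ("removed", cnt.getD "removed" 0),
       ("modified", cnt.getD "modified" 0 + cnt.getD "category_changed" 0 + cnt.getD "moved" 0),
       ("unchanged", (zones.length : Int) - cnt.getD "added" 0 - cnt.getD "removed" 0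
          - (cnt.getD "modified" 0 + cnt.getD "category_changed" 0 + cnt.getD "moved" 0))]) := rfl
  rw [h0]
  simp only [pv_foldl_map, PySem.Dict.getD_foldl_insert_add_one, PySem.Dict.getD_empty, zero_add]

theorem recalc_summary_py_spec : Claim_equal_recalc_summary_py := by
  intro zones _
  unfold Spec_recalc_summary_py
  rw [pvA_eq, pv_inv, pvB_eq]
  have hp := pv_partition (zones.map pvCt)
  have hl : (zones.map pvCt).length = zones.length := List.length_map _
  show [("added", _), ("removed", _), ("modified", _), ("unchanged", _)] = _
  simp only [List.cons.injEq, Prod.mk.injEq, zero_add, and_true, true_and]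
  omega
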